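-- pv_equiv track=rewrite | github.com/wyk18703232953/myResearch | codeComplex/data/filteredData/python/constant/python_constant_0169.py | dragons
-- ===== SOURCE A (Python) =====
-- def dragons(s: int, pairs):
--     sets_ = list(pairs)
--     sets_.sort(key=lambda x: x[0])
--     for ith, bonus in sets_:
--         if ith < s:
--             s += bonus
--         else:
--             return "NO"
--     return "YES"
-- ===== SOURCE B (Python) =====
-- def dragons(s: int, pairs):
--     sp = sorted(pairs, key=lambda x: x[0])
--     pref = [s]
--     for _, b in sp:
--         pref.append(pref[-1] + b)
--     return "YES" if all(ith < t for (ith, _), t in zip(sp, pref)) else "NO"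
-- ===== Notes on version B (the rewrite author's own statement) =====
-- stated objective: alternative
-- what changed: Replaces the stateful loop with early return by a precomputed prefix-sum table of running strengths plus a stateless all() scan over zip(sorted_pairs, prefixes).
import Mathlib
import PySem

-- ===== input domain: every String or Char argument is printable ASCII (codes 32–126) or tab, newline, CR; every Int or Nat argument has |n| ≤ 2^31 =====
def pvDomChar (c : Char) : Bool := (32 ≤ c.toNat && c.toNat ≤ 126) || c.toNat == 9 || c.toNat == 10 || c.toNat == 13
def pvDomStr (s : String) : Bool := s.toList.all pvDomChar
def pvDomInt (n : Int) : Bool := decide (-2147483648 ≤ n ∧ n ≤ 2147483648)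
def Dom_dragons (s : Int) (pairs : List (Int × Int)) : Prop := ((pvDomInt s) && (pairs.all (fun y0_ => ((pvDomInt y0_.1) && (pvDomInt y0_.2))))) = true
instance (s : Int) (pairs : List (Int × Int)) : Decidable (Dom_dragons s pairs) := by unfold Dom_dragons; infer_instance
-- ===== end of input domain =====

-- B replaces A's stateful early-return loop with a prefix-sum table of running strengths plus a stateless zip/all scan (alternative decomposition, same cost).


-- ===== PORT A =====
-- the for-loop with early return, as structural recursion over the sorted list
def dragonsLoop (s : Int) (l : List (Int × Int)) : String :=
  match l with
  | [] => "YES"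
  | (ith, bonus) :: t => if ith < s then dragonsLoop (s + bonus) t else "NO"

def dragons (s : Int) (pairs : List (Int × Int)) : String :=
  dragonsLoop s (PySem.List.sorted pairs (fun x => x.1) false)

-- ===== PORT B =====
def dragons_alt (s : Int) (pairs : List (Int × Int)) : String :=
  let sp := PySem.List.sorted pairs (fun x => x.1) false
  let pref := sp.foldl (fun acc p => acc ++ [acc.getLast! + p.2]) [s]
  if (sp.zip pref).all (fun q => decide (q.1.1 < q.2)) then "YES" else "NO"

-- ===== PRECONDITION & SPEC =====
def Spec_dragons (s : Int) (pairs : List (Int × Int)) (out : String) : Prop := out = dragons_alt s pairs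
instance (s : Int) (pairs : List (Int × Int)) (out : String) : Decidable (Spec_dragons s pairs out) := by unfold Spec_dragons; infer_instance

-- ===== CLAIM (what is proved, stated in full; the proofs are below) =====
def Claim_equal_dragons : Prop := ∀ (s : Int) (pairs : List (Int × Int)), Dom_dragons s pairs → Spec_dragons s pairs (dragons s pairs)

-- ===== LEMMAS AND PROOFS =====
-- the prefix-sum table B builds, written as direct recursion
def prefixList (a : Int) (l : List (Int × Int)) : List Int :=
  match l with
  | [] => [a]
  | (_, b) :: t => a :: prefixList (a + b) t

theorem prefFold (l : List (Int × Int)) (acc : List Int) (a : Int) :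
    l.foldl (fun acc p => acc ++ [acc.getLast! + p.2]) (acc ++ [a]) = acc ++ prefixList a l := by
  induction l generalizing acc a with
  | nil => simp [prefixList]
  | cons p t ih =>
    obtain ⟨i, b⟩ := p
    simp only [List.foldl_cons, prefixList]
    have h1 : (acc ++ [a]).getLast! = a := by
      induction acc with
      | nil => rfl
      | cons x xs ihx => simp [List.getLast!, List.getLast?_append] at *
    rw [h1, show acc ++ [a] ++ [a + b] = (acc ++ [a]) ++ [a + b] from rfl, ih]
    simp

theorem loop_eq_pref (l : List (Int × Int)) (s : Int) :
    dragonsLoop s l =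
      if (l.zip (prefixList s l)).all (fun q => decide (q.1.1 < q.2)) then "YES" else "NO" := by
  induction l generalizing s with
  | nil => simp [dragonsLoop, prefixList]
  | cons p t ih =>
    obtain ⟨i, b⟩ := p
    simp only [dragonsLoop, prefixList, List.zip_cons_cons, List.all_cons]
    by_cases h : i < s
    · rw [if_pos h, ih]
      simp only [Bool.and_eq_true, decide_eq_true_eq, h, true_and]
    · rw [if_neg h]
      simp only [Bool.and_eq_true, decide_eq_true_eq]
      rw [if_neg (fun hc => h hc.1)]

-- ===== VERDICT (by name: the statement is the Claim_ definition above) =====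
theorem dragons_spec : Claim_equal_dragons := by
  intro s pairs _
  unfold Spec_dragons dragons dragons_alt
  have h := prefFold (PySem.List.sorted pairs (fun x => x.1) false) [] s
  simp only [List.nil_append] at h
  dsimp only
  rw [loop_eq_pref, h]
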